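-- pv_equiv track=rewrite | github.com/BlockchainCommons/bc-translations | python/dcbor/src/dcbor/string_util.py | sanitized
-- ===== SOURCE A (Python) =====
-- def _is_printable(c: str) -> bool:
--     code = ord(c)
--     return code > 127 or 32 <= code <= 126
--
-- def sanitized(s: str) -> str | None:
--     has_printable = False
--     chars: list[str] = []
--     for c in s:
--         if _is_printable(c):
--             has_printable = True
--             chars.append(c)
--         else:
--             chars.append(".")
--     if not has_printable:
--         return None
--     return "".join(chars)
-- ===== SOURCE B (Python) =====
-- _TABLE = {i: "." for i in range(32)}
-- _TABLE[127] = "."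
--
-- def _is_printable(c: str) -> bool:
--     code = ord(c)
--     return code > 127 or 32 <= code <= 126
--
-- def sanitized(s: str) -> str | None:
--     if not any(_is_printable(c) for c in s):
--         return None
--     return s.translate(_TABLE)
-- ===== Notes on version B (the rewrite author's own statement) =====
-- stated objective: faster
-- what changed: Replaces the manual per-char branch-and-append loop with a precomputed translation table applied via str.translate plus an any() printability check.
import Mathlib
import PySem

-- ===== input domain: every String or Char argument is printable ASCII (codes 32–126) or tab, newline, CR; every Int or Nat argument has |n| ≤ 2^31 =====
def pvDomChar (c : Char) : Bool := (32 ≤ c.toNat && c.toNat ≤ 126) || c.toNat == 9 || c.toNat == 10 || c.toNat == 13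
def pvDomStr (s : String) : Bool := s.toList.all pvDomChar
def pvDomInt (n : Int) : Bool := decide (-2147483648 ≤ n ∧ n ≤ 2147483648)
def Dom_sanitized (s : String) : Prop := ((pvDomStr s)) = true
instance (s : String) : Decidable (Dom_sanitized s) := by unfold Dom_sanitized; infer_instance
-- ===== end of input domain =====

-- B replaces A's per-char branch-and-append loop with a translation-table map plus a separate any() printability check (idiomatic; same behaviour).

-- ===== PORT A =====
def isPrintableA (c : Char) : Bool := c.toNat > 127 || (32 ≤ c.toNat && c.toNat ≤ 126)

def sanitized (s : String) : Option String :=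
  let r := s.toList.foldl
    (fun (st : Bool × List Char) c =>
      if isPrintableA c then (true, st.2 ++ [c]) else (st.1, st.2 ++ ['.']))
    (false, [])
  if r.1 = false then none else some (String.ofList r.2)

-- ===== PORT B =====
-- translation table: code points 0..31 and 127 map to '.'
def translB (c : Char) : Char := if c.toNat ≤ 31 || c.toNat == 127 then '.' else c

def isPrintableB (c : Char) : Bool := c.toNat > 127 || (32 ≤ c.toNat && c.toNat ≤ 126)

def sanitized_alt (s : String) : Option String :=
  if s.toList.any isPrintableB = false then none
  else some (String.ofList (s.toList.map translB))

-- ===== PRECONDITION & SPEC =====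
def Spec_sanitized (s : String) (out : Option String) : Prop := out = sanitized_alt s
instance (s : String) (out : Option String) : Decidable (Spec_sanitized s out) := by unfold Spec_sanitized; infer_instance

-- ===== CLAIM (what is proved, stated in full; the proofs are below) =====
def Claim_equal_sanitized : Prop := ∀ (s : String), Dom_sanitized s → Spec_sanitized s (sanitized s)

-- ===== LEMMAS AND PROOFS =====

-- loop invariant: A's fold equals (seed-or-any, acc ++ translated map)
theorem foldA_eq (l : List Char) (b : Bool) (acc : List Char) :
    l.foldl
      (fun (st : Bool × List Char) c =>
        if isPrintableA c then (true, st.2 ++ [c]) else (st.1, st.2 ++ ['.']))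
      (b, acc) = (b || l.any isPrintableB, acc ++ l.map translB) := by
  induction l generalizing b acc with
  | nil => simp
  | cons c cs ih =>
    simp only [List.foldl_cons, List.any_cons, List.map_cons]
    by_cases h : isPrintableA c = true
    · have ht : translB c = c := by
        simp only [isPrintableA, Bool.or_eq_true, Bool.and_eq_true, decide_eq_true_eq] at h
        simp only [translB]
        have : ¬(c.toNat ≤ 31 || c.toNat == 127) = true := by
          simp only [Bool.or_eq_true, decide_eq_true_eq, beq_iff_eq]
          omega
        simp [this]
      rw [if_pos h, ih]
      have hb : isPrintableB c = true := h
      simp [hb, ht]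
    · have hf : isPrintableA c = false := by simpa using h
      have ht : translB c = '.' := by
        simp only [isPrintableA, Bool.or_eq_false_iff, Bool.and_eq_false_iff,
          decide_eq_false_iff_not] at hf
        simp only [translB]
        have : (c.toNat ≤ 31 || c.toNat == 127) = true := by
          simp only [Bool.or_eq_true, decide_eq_true_eq, beq_iff_eq]
          omega
        simp [this]
      rw [if_neg h, ih]
      have hb : isPrintableB c = false := hf
      simp [hb, ht]

-- ===== VERDICT (by name: the statement is the Claim_ definition above) =====
theorem sanitized_spec : Claim_equal_sanitized := by
  intro s _
  unfold Spec_sanitized sanitized sanitized_alt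
  rw [foldA_eq]
  simp
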